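-- pv_equiv track=rewrite | github.com/Qiskit/qiskit | qiskit/transpiler/passes/optimization/control_pattern_simplification.py | find_xor_pairs
-- ===== SOURCE A (Python) =====
-- from typing import List, Optional, Tuple
--
-- def find_xor_pairs(patterns: List[str]) -> List[Tuple[str, str, List[int], str]]:
--     """Find pairs of patterns that form XOR relationships.
--
--     An XOR pair has exactly 2 bit positions that differ between the patterns.
--
--     Args:
--         patterns: List of binary control pattern strings
--
--     Returns:
--         List of tuples (pattern1, pattern2, diff_positions, xor_type) where:
--         - diff_positions: [pos_i, pos_j] positions that differ (0-indexed)
--         - xor_type: '10-01', '01-10', '11-00', or '00-11'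
--     """
--     xor_pairs = []
--     patterns_list = list(patterns)
--
--     for i in range(len(patterns_list)):
--         for j in range(i + 1, len(patterns_list)):
--             p1 = patterns_list[i]
--             p2 = patterns_list[j]
--
--             # Find positions where patterns differ
--             diff_positions = [k for k in range(len(p1)) if p1[k] != p2[k]]
--
--             if len(diff_positions) == 2:
--                 # This is an XOR pair
--                 pos_i, pos_j = diff_positions
--
--                 # Determine XOR type based on bit values
--                 bits_p1 = p1[pos_i] + p1[pos_j]
--                 bits_p2 = p2[pos_i] + p2[pos_j]
--
--                 # Determine XOR pattern type
--                 if bits_p1 == '10' and bits_p2 == '01':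
--                     xor_type = '10-01'
--                 elif bits_p1 == '01' and bits_p2 == '10':
--                     xor_type = '01-10'
--                 elif bits_p1 == '11' and bits_p2 == '00':
--                     xor_type = '11-00'
--                 elif bits_p1 == '00' and bits_p2 == '11':
--                     xor_type = '00-11'
--                 else:
--                     continue  # Not a standard XOR pattern
--
--                 xor_pairs.append((p1, p2, diff_positions, xor_type))
--
--     return xor_pairs
-- ===== SOURCE B (Python) =====
-- from typing import List, Optional, Tuple
--
-- _FLIP = {'0': '1', '1': '0'}
--
--
-- def find_xor_pairs(patterns: List[str]) -> List[Tuple[str, str, List[int], str]]: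
--     # Hash-index algorithm: an XOR partner of a fixed-width pattern p is exactly
--     # p with two binary positions a < b flipped.  Build a dict from pattern to its
--     # (ascending) list of indices once, then for every pattern and every position
--     # pair look the flipped candidate up; sort each row's hits by partner index so
--     # the output order matches the pairwise definition.
--     pats = list(patterns)
--     if len({len(p) for p in pats}) > 1:
--         raise ValueError("patterns must share a common width")
--     index = {}
--     for idx, p in enumerate(pats):
--         index.setdefault(p, []).append(idx)
--     result = []
--     for i, p in enumerate(pats):
--         row = []
--         width = len(p)
--         for a in range(width):
--             ca = p[a]
--             if ca not in _FLIP: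
--                 continue
--             for b in range(a + 1, width):
--                 cb = p[b]
--                 if cb not in _FLIP:
--                     continue
--                 q = p[:a] + _FLIP[ca] + p[a + 1:b] + _FLIP[cb] + p[b + 1:]
--                 for j in index.get(q, []):
--                     if j > i:
--                         row.append((j, (p, pats[j], [a, b], ca + cb + '-' + _FLIP[ca] + _FLIP[cb])))
--         row.sort(key=lambda r: r[0])
--         result.extend(t for _, t in row)
--     return result
-- ===== Notes on version B (the rewrite author's own statement) =====
-- stated objective: faster
-- what changed: A scans every pair of patterns (O(n^2) pairs) collecting their differing positions with an if/elif classification; B never compares two patterns directly: it builds a hash index from pattern string to its ascending index list once, then for each pattern and each pair of binary positions looks up the uniquely determined two-bit-flipped partner pattern in the index (sub-quadratic in n when n >> L^2), sorting each row's hits by partner index to restore the pairwise order. …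
-- outside the precondition, e.g. on find_xor_pairs(['01', '1011']): A returns [('01', '1011', [0, 1], '01-10')], B raises ValueError; on find_xor_pairs(['10', '0']): A raises IndexError, B raises ValueError
import Mathlib
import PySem

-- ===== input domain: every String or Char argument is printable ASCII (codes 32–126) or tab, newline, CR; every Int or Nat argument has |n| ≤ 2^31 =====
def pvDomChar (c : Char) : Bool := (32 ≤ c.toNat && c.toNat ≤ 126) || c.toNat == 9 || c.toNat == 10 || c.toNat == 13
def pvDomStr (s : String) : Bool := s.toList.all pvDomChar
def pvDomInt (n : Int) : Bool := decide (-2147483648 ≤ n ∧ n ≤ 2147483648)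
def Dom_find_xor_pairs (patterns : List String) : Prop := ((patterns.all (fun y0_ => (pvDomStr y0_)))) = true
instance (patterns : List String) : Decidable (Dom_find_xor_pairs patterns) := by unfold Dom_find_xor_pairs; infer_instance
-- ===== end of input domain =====

-- B replaces A's all-pairs difference scan by a hash index from pattern to its index
-- list plus, per pattern, lookups of the uniquely determined two-bit-flipped partner
-- for every binary position pair, re-sorted per row (objective: faster, measured).


-- ===== PORT A =====
-- inner-loop body of A: the value appended for the pair (p1, p2), if any
def innerA (p1 p2 : String) : Option (String × String × List Int × String) :=
  let diff_positions := (PySem.List.pyRange 0 (PySem.Str.len p1) 1).filter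
      (fun k => PySem.Str.pyGet? p1 k != PySem.Str.pyGet? p2 k)
  if diff_positions.length = 2 then
    match diff_positions with
    | [pos_i, pos_j] =>
      let b1i := PySem.Str.pyGet? p1 pos_i
      let b1j := PySem.Str.pyGet? p1 pos_j
      let b2i := PySem.Str.pyGet? p2 pos_i
      let b2j := PySem.Str.pyGet? p2 pos_j
      if b1i == some '1' && b1j == some '0' && b2i == some '0' && b2j == some '1' then
        some (p1, p2, [pos_i, pos_j], "10-01")
      else if b1i == some '0' && b1j == some '1' && b2i == some '1' && b2j == some '0' then
        some (p1, p2, [pos_i, pos_j], "01-10")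
      else if b1i == some '1' && b1j == some '1' && b2i == some '0' && b2j == some '0' then
        some (p1, p2, [pos_i, pos_j], "11-00")
      else if b1i == some '0' && b1j == some '0' && b2i == some '1' && b2j == some '1' then
        some (p1, p2, [pos_i, pos_j], "00-11")
      else none
    | _ => none
  else none

def find_xor_pairs (patterns : List String) : List (String × String × List Int × String) :=
  let patterns_list := patterns
  (PySem.List.pyRange 0 (patterns_list.length : Int) 1).foldl (fun xor_pairs i =>
    (PySem.List.pyRange (i + 1) (patterns_list.length : Int) 1).foldl (fun xor_pairs j =>
      let p1 := PySem.List.pyGetD patterns_list i ""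
      let p2 := PySem.List.pyGetD patterns_list j ""
      -- append the tuple when the body produced one ('continue' otherwise)
      xor_pairs ++ (innerA p1 p2).toList) xor_pairs) []

-- ===== PORT B =====
-- _FLIP[c]; only reached after Source B's 'c in _FLIP' membership guard
def flipC (c : Char) : Char := if c = '0' then '1' else '0'

-- Source B's membership test 'c in _FLIP'
def isBin (c : Char) : Bool := c == '0' || c == '1'

-- q = p[:a] + _FLIP[ca] + p[a+1:b] + _FLIP[cb] + p[b+1:]  on the character list
-- (Python str keys are represented by their character lists: str equality = list equality)
def qKey (p : List Char) (a b : Int) : List Char :=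
  PySem.List.slice p none (some a) ++ [flipC (PySem.List.pyGetD p a ' ')]
    ++ PySem.List.slice p (some (a + 1)) (some b) ++ [flipC (PySem.List.pyGetD p b ' ')]
    ++ PySem.List.slice p (some (b + 1)) none

-- for idx, p in enumerate(pats): index.setdefault(p, []).append(idx)
def bIndex (pats : List String) : PySem.Dict (List Char) (List Int) :=
  (PySem.List.enumerate pats).foldl
    (fun d e => d.modify e.2.toList [] (fun v => v ++ [e.1])) PySem.Dict.empty

-- the row collected for pattern p at list position i (the three inner loops of Source B)
def bRow (pats : List String) (idx : PySem.Dict (List Char) (List Int)) (i : Int) (p : String) :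
    List (Int × (String × String × List Int × String)) :=
  (PySem.List.pyRange 0 (PySem.Str.len p) 1).foldl (fun row a =>
    let ca := PySem.List.pyGetD p.toList a ' '
    if isBin ca then
      (PySem.List.pyRange (a + 1) (PySem.Str.len p) 1).foldl (fun row b =>
        let cb := PySem.List.pyGetD p.toList b ' '
        if isBin cb then
          (PySem.Dict.getD idx (qKey p.toList a b) []).foldl (fun row j =>
            if i < j then
              row ++ [(j, (p, PySem.List.pyGetD pats j "", [a, b],
                String.ofList [ca, cb, '-', flipC ca, flipC cb]))]
            else row) row
        else row) row
    else row) []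

def find_xor_pairs_alt (patterns : List String) : List (String × String × List Int × String) :=
  let pats := patterns
  -- Source B raises ValueError on mixed widths; those inputs are outside Pre_ (port returns [])
  if 1 < (PySem.Set.ofList (pats.map (fun p => PySem.Str.len p))).length then []
  else
    let idx := bIndex pats
    (PySem.List.enumerate pats).foldl (fun result e =>
      result ++ (PySem.List.sorted (bRow pats idx e.1 e.2) (fun r => r.1)).map
        (fun r => r.2)) []

-- ===== PRECONDITION & SPEC =====
-- Pre_ excludes lists with patterns of unequal widths: there A either raises IndexError
-- (a longer pattern before a shorter one) or accidentally compares only a prefix of the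
-- longer pattern (shorter first); B validates the common width and raises ValueError.
def Pre_find_xor_pairs (patterns : List String) : Prop :=
  ∀ p ∈ patterns, ∀ q ∈ patterns, p.toList.length = q.toList.length
instance (patterns : List String) : Decidable (Pre_find_xor_pairs patterns) := by
  unfold Pre_find_xor_pairs; infer_instance

def pvWitness_find_xor_pairs : List String := ["010", "001", "111", "100"]

def Spec_find_xor_pairs (patterns : List String) (out : List (String × String × List Int × String)) : Prop := out = find_xor_pairs_alt patterns
instance (patterns : List String) (out : List (String × String × List Int × String)) : Decidable (Spec_find_xor_pairs patterns out) := by unfold Spec_find_xor_pairs; infer_instance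

-- ===== CLAIM (what is proved, stated in full; the proofs are below) =====
def Claim_equal_find_xor_pairs : Prop := ∀ (patterns : List String), Dom_find_xor_pairs patterns → Pre_find_xor_pairs patterns → Spec_find_xor_pairs patterns (find_xor_pairs patterns)

-- ===== LEMMAS AND PROOFS =====

-- ---- generic list lemmas ----

theorem foldl_opt {α β : Type} (g : α → Option β) (l : List α) (acc : List β) :
    l.foldl (fun a x => a ++ (g x).toList) acc = acc ++ l.filterMap g := by
  induction l generalizing acc with
  | nil => simp
  | cons x t ih =>
    rw [List.foldl_cons, ih]
    cases h : g x <;> simp [h]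

theorem flatMap_congr_mem {α γ : Type} (l : List α) (f g : α → List γ)
    (h : ∀ x ∈ l, f x = g x) : l.flatMap f = l.flatMap g := by
  induction l with
  | nil => rfl
  | cons x t ih =>
    simp only [List.flatMap_cons]
    rw [h x (by simp), ih (fun y hy => h y (List.mem_cons_of_mem _ hy))]

theorem map_filter_eq {α β : Type} (f : α → β) (p : β → Bool) (q : α → Bool) (l : List α)
    (h : ∀ x ∈ l, p (f x) = q x) : (l.map f).filter p = (l.filter q).map f := by
  induction l with
  | nil => rfl
  | cons x t ih =>
    have ht : (t.map f).filter p = (t.filter q).map f :=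
      ih (fun y hy => h y (List.mem_cons_of_mem _ hy))
    simp only [List.map_cons, List.filter_cons, h x (by simp)]
    cases hq : q x <;> simp [ht]

-- a foldl whose body conditionally extends the accumulator on the left is a flatMap
theorem foldl_if_flat {α γ : Type} (p : α → Prop) [DecidablePred p] (h : α → List γ)
    (l : List α) (init : List γ) :
    l.foldl (fun acc x => if p x then acc ++ h x else acc) init
      = init ++ l.flatMap (fun x => if p x then h x else []) := by
  induction l generalizing init with
  | nil => simp
  | cons x t ih =>
    rw [List.foldl_cons, List.flatMap_cons]
    by_cases hp : p x
    · rw [if_pos hp, if_pos hp, ih, List.append_assoc]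
    · rw [if_neg hp, if_neg hp, ih, List.nil_append]

-- a guarded foldl whose taken branch extends the accumulator on the left is a flatMap
theorem foldl_if_step {α γ : Type} (c : α → Prop) [DecidablePred c]
    (inner : List γ → α → List γ) (g : α → List γ)
    (hin : ∀ acc x, inner acc x = acc ++ g x) (l : List α) (init : List γ) :
    l.foldl (fun acc x => if c x then inner acc x else acc) init
      = init ++ l.flatMap (fun x => if c x then g x else []) := by
  induction l generalizing init with
  | nil => simp
  | cons x t ih =>
    rw [List.foldl_cons, List.flatMap_cons]
    by_cases hc : c x
    · rw [if_pos hc, if_pos hc, hin, ih, List.append_assoc]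
    · rw [if_neg hc, if_neg hc, ih, List.nil_append]

-- a flatMap whose slots tag their elements with the slot is Nodup
theorem nodup_flatMap_tag {α β : Type} (l : List α) (f : α → List β) (tag : β → α)
    (hl : l.Nodup) (hf : ∀ a ∈ l, (f a).Nodup)
    (ht : ∀ a ∈ l, ∀ x ∈ f a, tag x = a) : (l.flatMap f).Nodup := by
  induction l with
  | nil => simp
  | cons a t ih =>
    rw [List.flatMap_cons, List.nodup_append]
    refine ⟨hf a (by simp), ih (List.Nodup.of_cons hl)
      (fun b hb => hf b (List.mem_cons_of_mem _ hb))
      (fun b hb => ht b (List.mem_cons_of_mem _ hb)), ?_⟩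
    intro x hx y hy
    rintro rfl
    rcases List.mem_flatMap.mp hy with ⟨b, hb, hxb⟩
    have h1 : tag x = a := ht a (by simp) x hx
    have h2 : tag x = b := ht b (List.mem_cons_of_mem _ hb) x hxb
    have : a ∈ t := by rw [← h2, h1] at hb; exact hb
    exact (List.nodup_cons.mp hl).1 this

theorem filter_lt_range (k n : Nat) :
    (List.range n).filter (fun j => decide (k < j)) = List.range' (k + 1) (n - (k + 1)) := by
  induction n with
  | zero => simp
  | succ n ih =>
    rw [List.range_succ, List.filter_append, ih]
    by_cases hk : k < n
    · rw [show (n + 1 - (k + 1)) = (n - (k + 1)) + 1 from by omega, List.range'_concat]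
      simp [hk]
    · have h1 : n + 1 - (k + 1) = 0 := by omega
      have h2 : n - (k + 1) = 0 := by omega
      simp [h1, h2, hk]

-- ---- A-side characterization ----

-- the common diff-position list (Nat indices)
def dq (l1 l2 : List Char) : List Nat :=
  (List.range l1.length).filter (fun k => l1.getD k ' ' != l2.getD k ' ')

theorem A_diffs (p1 p2 : String) (h : p1.toList.length ≤ p2.toList.length) :
    (PySem.List.pyRange 0 (PySem.Str.len p1)).filter
        (fun k => PySem.Str.pyGet? p1 k != PySem.Str.pyGet? p2 k)
      = (dq p1.toList p2.toList).map (fun k : Nat => (k : Int)) := by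
  rw [PySem.Str.len_eq, PySem.List.pyRange_zero_nat]
  unfold dq
  rw [map_filter_eq (fun k : Nat => (k : Int))
    (fun k => PySem.Str.pyGet? p1 k != PySem.Str.pyGet? p2 k)
    (fun k : Nat => p1.toList.getD k ' ' != p2.toList.getD k ' ') (List.range p1.toList.length)]
  intro k hk
  have hk1 : k < p1.toList.length := List.mem_range.mp hk
  have hk2 : k < p2.toList.length := lt_of_lt_of_le hk1 h
  rw [PySem.Str.pyGet?_natCast, PySem.Str.pyGet?_natCast,
    List.getElem?_eq_getElem hk1, List.getElem?_eq_getElem hk2,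
    List.getD_eq_getElem _ _ hk1, List.getD_eq_getElem _ _ hk2]
  rfl

-- the two-position flip (what Source B's q computes, Nat indices; both flips read p)
def flipN (l : List Char) (a b : Nat) : List Char :=
  (l.set a (flipC (l.getD a ' '))).set b (flipC (l.getD b ' '))

theorem length_flipN (l : List Char) (a b : Nat) : (flipN l a b).length = l.length := by
  simp [flipN]

theorem getD_flipN (l : List Char) (a b k : Nat) (hk : k < l.length) :
    (flipN l a b).getD k ' '
      = if k = b then flipC (l.getD b ' ')
        else if k = a then flipC (l.getD a ' ') else l.getD k ' ' := by
  have hk' : k < (flipN l a b).length := by rw [length_flipN]; exact hk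
  rw [List.getD_eq_getElem _ _ hk']
  unfold flipN
  rw [List.getElem_set, List.getElem_set]
  by_cases h1 : k = b
  · simp [h1]
  · rw [if_neg h1, if_neg (fun h => h1 h.symm)]
    by_cases h2 : k = a
    · rw [if_pos h2.symm, if_pos h2]
    · rw [if_neg (fun h => h2 h.symm), if_neg h2, List.getD_eq_getElem _ _ hk]

theorem qKey_eq (l : List Char) (a b : Nat) (hab : a < b) (hb : b < l.length) :
    qKey l (a : Int) (b : Int) = flipN l a b := by
  have ha : a < l.length := by omega
  unfold qKey flipN
  rw [PySem.List.slice_to_natCast,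
    show ((a : Int) + 1) = ((a + 1 : Nat) : Int) from by push_cast; ring,
    show ((b : Int) + 1) = ((b + 1 : Nat) : Int) from by push_cast; ring,
    PySem.List.slice_natCast, PySem.List.slice_from_natCast,
    PySem.List.pyGetD_natCast, PySem.List.pyGetD_natCast]
  -- unfold the two set operations (outer set first)
  rw [List.set_eq_take_append_cons_drop (i := b), if_pos (by simp [List.length_set]; omega)]
  rw [List.set_eq_take_append_cons_drop (i := a), if_pos ha]
  have hlen : (l.take a).length = a := by simp; omega
  have ht : (l.take a ++ flipC (l.getD a ' ') :: l.drop (a + 1)).take b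
      = l.take a ++ flipC (l.getD a ' ') :: (l.drop (a + 1)).take (b - (a + 1)) := by
    rw [List.take_append, hlen, List.take_take, show min b a = a from by omega,
      show b - a = (b - (a + 1)) + 1 from by omega, List.take_succ_cons]
  have hd : (l.take a ++ flipC (l.getD a ' ') :: l.drop (a + 1)).drop (b + 1)
      = l.drop (b + 1) := by
    rw [List.drop_append, hlen,
      List.drop_eq_nil_of_le (as := l.take a) (by rw [hlen]; omega),
      show (b + 1) - a = (b - a) + 1 from by omega, List.drop_succ_cons, List.drop_drop]
    rw [show (a + 1) + (b - a) = b + 1 from by omega]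
    rfl
  rw [ht, hd]
  simp

theorem flip_ne (c : Char) (h : isBin c = true) : flipC c ≠ c := by
  rcases (by simpa [isBin] using h : c = '0' ∨ c = '1') with h | h <;> simp [h, flipC]

theorem filter_range_none (a b n : Nat) (ha : n ≤ a) (hb : n ≤ b) :
    (List.range n).filter (fun k => decide (k = a ∨ k = b)) = [] := by
  refine List.filter_eq_nil_iff.mpr (fun k hk => ?_)
  have := List.mem_range.mp hk
  simp only [decide_eq_true_eq]
  omega

theorem filter_range_single (a b n : Nat) (ha : a < n) (hbn : n ≤ b) :
    (List.range n).filter (fun k => decide (k = a ∨ k = b)) = [a] := by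
  induction n with
  | zero => omega
  | succ n ih =>
    rw [List.range_succ, List.filter_append]
    by_cases han : a < n
    · rw [ih han (by omega)]
      have : ¬ (n = a ∨ n = b) := by omega
      simp [this]
    · have hae : a = n := by omega
      rw [filter_range_none a b n (by omega) (by omega)]
      simp [hae]

theorem filter_range_pair (a b n : Nat) (hab : a < b) (hb : b < n) :
    (List.range n).filter (fun k => decide (k = a ∨ k = b)) = [a, b] := by
  induction n with
  | zero => omega
  | succ n ih =>
    rw [List.range_succ, List.filter_append]
    by_cases hbn : b < n
    · rw [ih hbn]
      have : ¬ (n = a ∨ n = b) := by omega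
      simp [this]
    · have hbe : b = n := by omega
      rw [filter_range_single a b n (by omega) (by omega)]
      simp [hbe]

theorem dq_flipN (l : List Char) (a b : Nat) (hab : a < b) (hb : b < l.length)
    (ha2 : isBin (l.getD a ' ') = true) (hb2 : isBin (l.getD b ' ') = true) :
    dq l (flipN l a b) = [a, b] := by
  unfold dq
  rw [List.filter_congr (q := fun k => decide (k = a ∨ k = b)) ?_]
  · exact filter_range_pair a b l.length hab hb
  · intro k hk
    have hkl : k < l.length := List.mem_range.mp hk
    rw [getD_flipN l a b k hkl]
    by_cases h1 : k = b
    · have hne : l.getD b ' ' ≠ flipC (l.getD b ' ') := fun he => flip_ne _ hb2 he.symm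
      simp only [List.getD_eq_getElem?_getD] at hne
      simp [h1, hne]
    · by_cases h2 : k = a
      · have hne : l.getD a ' ' ≠ flipC (l.getD a ' ') := fun he => flip_ne _ ha2 he.symm
        simp only [List.getD_eq_getElem?_getD] at hne
        have hne2 : a ≠ b := by omega
        simp [h2, hne, hne2]
      · simp [h1, h2]

theorem dq_pairwise (l1 l2 : List Char) : (dq l1 l2).Pairwise (· < ·) :=
  List.pairwise_lt_range.filter _

theorem dq_mem_lt (l1 l2 : List Char) (k : Nat) (h : k ∈ dq l1 l2) : k < l1.length :=
  List.mem_range.mp (List.mem_of_mem_filter h)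

-- A's if/elif chain over the four characters, as one condition
theorem chain_iff (p1 p2 : String) (I J : Int) (c1 c2 d1 d2 : Char)
    (v : String × String × List Int × String) :
    (if c1 == '1' && c2 == '0' && d1 == '0' && d2 == '1' then
        some (p1, p2, [I, J], "10-01")
      else if c1 == '0' && c2 == '1' && d1 == '1' && d2 == '0' then
        some (p1, p2, [I, J], "01-10")
      else if c1 == '1' && c2 == '1' && d1 == '0' && d2 == '0' then
        some (p1, p2, [I, J], "11-00")
      else if c1 == '0' && c2 == '0' && d1 == '1' && d2 == '1' then
        some (p1, p2, [I, J], "00-11")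
      else none) = some v
    ↔ (isBin c1 = true ∧ isBin c2 = true ∧ d1 = flipC c1 ∧ d2 = flipC c2 ∧
        v = (p1, p2, [I, J], String.ofList [c1, c2, '-', flipC c1, flipC c2])) := by
  by_cases h10 : c1 = '0' <;> by_cases h11 : c1 = '1' <;>
    by_cases h20 : c2 = '0' <;> by_cases h21 : c2 = '1' <;>
    simp_all [isBin, flipC] <;>
    by_cases hd1 : d1 = '0' <;> by_cases hd2 : d2 = '0' <;>
    by_cases hd1' : d1 = '1' <;> by_cases hd2' : d2 = '1' <;>
    simp_all [eq_comm (a := v)]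

-- flipped at the two diff positions and equal elsewhere means the full flip
theorem eq_flipN_of (l1 l2 : List Char) (hlen : l1.length = l2.length) (k1 k2 : Nat)
    (h12 : k1 < k2) (hk2 : k2 < l1.length) (hd : dq l1 l2 = [k1, k2])
    (h1 : l2.getD k1 ' ' = flipC (l1.getD k1 ' '))
    (h2 : l2.getD k2 ' ' = flipC (l1.getD k2 ' ')) : l2 = flipN l1 k1 k2 := by
  apply List.ext_getElem (by rw [length_flipN]; omega)
  intro m hm hm'
  have hmL : m < l1.length := by rw [length_flipN] at hm'; exact hm'
  have e : (flipN l1 k1 k2).getD m ' ' = l2.getD m ' ' := by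
    rw [getD_flipN l1 k1 k2 m hmL]
    by_cases hb : m = k2
    · subst hb
      rw [if_pos rfl]
      exact h2.symm
    · by_cases ha : m = k1
      · subst ha
        rw [if_neg hb, if_pos rfl]
        exact h1.symm
      · have hnm : ¬ (l1.getD m ' ' != l2.getD m ' ') = true := by
          intro hpred
          have hmem : m ∈ dq l1 l2 := List.mem_filter.mpr ⟨List.mem_range.mpr hmL, hpred⟩
          rw [hd] at hmem
          simp at hmem
          tauto
        have heq : l1.getD m ' ' = l2.getD m ' ' := by simpa using hnm
        rw [if_neg hb, if_neg ha]
        exact heq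
  rw [List.getD_eq_getElem _ _ (by rw [length_flipN]; omega),
    List.getD_eq_getElem _ _ hm] at e
  exact e.symm

-- central characterization: innerA returns some v exactly at two-bit binary flips
theorem innerA_iff (p1 p2 : String) (hlen : p1.toList.length = p2.toList.length)
    (v : String × String × List Int × String) :
    innerA p1 p2 = some v ↔ ∃ a b : Nat, a < b ∧ b < p1.toList.length ∧
      isBin (p1.toList.getD a ' ') = true ∧ isBin (p1.toList.getD b ' ') = true ∧
      p2.toList = flipN p1.toList a b ∧
      v = (p1, p2, [(a : Int), (b : Int)],
        String.ofList [p1.toList.getD a ' ', p1.toList.getD b ' ', '-',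
          flipC (p1.toList.getD a ' '), flipC (p1.toList.getD b ' ')]) := by
  have hle : p1.toList.length ≤ p2.toList.length := le_of_eq hlen
  unfold innerA
  rw [A_diffs p1 p2 hle]
  rcases hdq : dq p1.toList p2.toList with _ | ⟨k1, _ | ⟨k2, _ | ⟨k3, rest⟩⟩⟩
  · constructor
    · intro h; simp at h
    · rintro ⟨a, b, hab, hbL, ha2, hb2, hp2, -⟩
      have : dq p1.toList p2.toList = [a, b] := by
        rw [hp2]; exact dq_flipN _ a b hab hbL ha2 hb2
      rw [hdq] at this; simp at this
  · constructor
    · intro h; simp at h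
    · rintro ⟨a, b, hab, hbL, ha2, hb2, hp2, -⟩
      have : dq p1.toList p2.toList = [a, b] := by
        rw [hp2]; exact dq_flipN _ a b hab hbL ha2 hb2
      rw [hdq] at this; simp at this
  · -- exactly two diff positions
    have hk12 : k1 < k2 := by
      have := dq_pairwise p1.toList p2.toList
      rw [hdq] at this
      exact (List.pairwise_cons.mp this).1 k2 (by simp)
    have hk2L : k2 < p1.toList.length := dq_mem_lt _ _ k2 (by rw [hdq]; simp)
    have hk1L : k1 < p1.toList.length := by omega
    have hk1L' : k1 < p2.toList.length := by omega
    have hk2L' : k2 < p2.toList.length := by omega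
    show (if PySem.Str.pyGet? p1 ((k1 : Int)) == some '1' && PySem.Str.pyGet? p1 ((k2 : Int)) == some '0'
            && PySem.Str.pyGet? p2 ((k1 : Int)) == some '0' && PySem.Str.pyGet? p2 ((k2 : Int)) == some '1' then
          some (p1, p2, [(k1 : Int), (k2 : Int)], "10-01")
        else if PySem.Str.pyGet? p1 ((k1 : Int)) == some '0' && PySem.Str.pyGet? p1 ((k2 : Int)) == some '1'
            && PySem.Str.pyGet? p2 ((k1 : Int)) == some '1' && PySem.Str.pyGet? p2 ((k2 : Int)) == some '0' then
          some (p1, p2, [(k1 : Int), (k2 : Int)], "01-10")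
        else if PySem.Str.pyGet? p1 ((k1 : Int)) == some '1' && PySem.Str.pyGet? p1 ((k2 : Int)) == some '1'
            && PySem.Str.pyGet? p2 ((k1 : Int)) == some '0' && PySem.Str.pyGet? p2 ((k2 : Int)) == some '0' then
          some (p1, p2, [(k1 : Int), (k2 : Int)], "11-00")
        else if PySem.Str.pyGet? p1 ((k1 : Int)) == some '0' && PySem.Str.pyGet? p1 ((k2 : Int)) == some '0'
            && PySem.Str.pyGet? p2 ((k1 : Int)) == some '1' && PySem.Str.pyGet? p2 ((k2 : Int)) == some '1' then
          some (p1, p2, [(k1 : Int), (k2 : Int)], "00-11")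
        else none) = some v
      ↔ _
    have e1 : PySem.Str.pyGet? p1 ((k1 : Int)) = some (p1.toList.getD k1 ' ') := by
      rw [PySem.Str.pyGet?_natCast, List.getElem?_eq_getElem hk1L, List.getD_eq_getElem _ _ hk1L]
    have e2 : PySem.Str.pyGet? p1 ((k2 : Int)) = some (p1.toList.getD k2 ' ') := by
      rw [PySem.Str.pyGet?_natCast, List.getElem?_eq_getElem hk2L, List.getD_eq_getElem _ _ hk2L]
    have e3 : PySem.Str.pyGet? p2 ((k1 : Int)) = some (p2.toList.getD k1 ' ') := by
      rw [PySem.Str.pyGet?_natCast, List.getElem?_eq_getElem hk1L', List.getD_eq_getElem _ _ hk1L']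
    have e4 : PySem.Str.pyGet? p2 ((k2 : Int)) = some (p2.toList.getD k2 ' ') := by
      rw [PySem.Str.pyGet?_natCast, List.getElem?_eq_getElem hk2L', List.getD_eq_getElem _ _ hk2L']
    rw [e1, e2, e3, e4]
    simp only [show ∀ (x y : Char), ((some x == some y)) = (x == y) from fun _ _ => rfl]
    rw [chain_iff p1 p2 (k1 : Int) (k2 : Int)]
    constructor
    · rintro ⟨h1, h2, h3, h4, h5⟩
      exact ⟨k1, k2, hk12, hk2L, h1, h2,
        eq_flipN_of p1.toList p2.toList hlen k1 k2 hk12 hk2L hdq h3 h4, h5⟩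
    · rintro ⟨a, b, hab, hbL, ha2, hb2, hp2, hv⟩
      have hda : dq p1.toList p2.toList = [a, b] := by
        rw [hp2]; exact dq_flipN _ a b hab hbL ha2 hb2
      rw [hdq] at hda
      injection hda with ea et
      injection et with eb _
      subst ea
      subst eb
      have hd1 : p2.toList.getD k1 ' ' = flipC (p1.toList.getD k1 ' ') := by
        rw [hp2, getD_flipN _ k1 k2 k1 hk1L, if_neg (by omega), if_pos rfl]
      have hd2 : p2.toList.getD k2 ' ' = flipC (p1.toList.getD k2 ' ') := by
        rw [hp2, getD_flipN _ k1 k2 k2 hk2L, if_pos rfl]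
      exact ⟨ha2, hb2, hd1, hd2, hv⟩
  · -- three or more diff positions
    constructor
    · intro h; simp at h
    · rintro ⟨a, b, hab, hbL, ha2, hb2, hp2, -⟩
      have : dq p1.toList p2.toList = [a, b] := by
        rw [hp2]; exact dq_flipN _ a b hab hbL ha2 hb2
      rw [hdq] at this; simp at this

-- ---- A as a flatMap of rows ----

theorem A_rows (xs : List String) :
    find_xor_pairs xs = (List.range xs.length).flatMap (fun k =>
      ((List.range xs.length).filter (fun j => decide (k < j))).filterMap
        (fun j => innerA (xs.getD k "") (xs.getD j ""))) := by
  have h1 : find_xor_pairs xs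
      = (PySem.List.pyRange 0 (xs.length : Int)).foldl
          (fun acc i => acc ++ (PySem.List.pyRange (i + 1) (xs.length : Int)).filterMap
              (fun j => innerA (PySem.List.pyGetD xs i "") (PySem.List.pyGetD xs j ""))) [] := by
    unfold find_xor_pairs
    apply PySem.List.foldl_congr_mem
    intro acc i hi
    rw [foldl_opt (fun j => innerA (PySem.List.pyGetD xs i "") (PySem.List.pyGetD xs j ""))]
  rw [h1, PySem.List.foldl_append_eq_flatMap, List.nil_append, PySem.List.pyRange_zero_nat,
    List.flatMap_map]
  refine flatMap_congr_mem _ _ _ (fun k hk => ?_)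
  have hr : PySem.List.pyRange ((k : Int) + 1) (xs.length : Int)
      = ((List.range xs.length).filter (fun j => decide (k < j))).map
          (fun j : Nat => (j : Int)) := by
    rw [filter_lt_range, PySem.List.pyRange_one, List.range'_eq_map_range, List.map_map]
    rw [show ((xs.length : Int) - ((k : Int) + 1)).toNat = xs.length - (k + 1) from by omega]
    refine List.map_congr_left (fun t ht => ?_)
    simp only [Function.comp_apply]
    push_cast
    ring
  rw [hr, List.filterMap_map]
  refine List.filterMap_congr (fun j hj => ?_)
  simp only [Function.comp_apply, PySem.List.pyGetD_natCast]

-- ---- B-side lemmas ----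

theorem bIndex_getD (pats : List String) (q : List Char) :
    (bIndex pats).getD q []
      = ((PySem.List.enumerate pats).filter (fun e => e.2.toList == q)).map (·.1) := by
  unfold bIndex
  rw [show (PySem.List.enumerate pats).foldl
        (fun d e => d.modify e.2.toList [] (fun v => v ++ [e.1])) PySem.Dict.empty
      = ((PySem.List.enumerate pats).map (fun e => (e.2.toList, e.1))).foldl
          (fun d p => PySem.Dict.modify d p.1 [] (fun v => v ++ [p.2])) PySem.Dict.empty from by
      rw [List.foldl_map],
    PySem.Dict.getD_foldl_modify_append, PySem.Dict.getD_empty,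
    List.nil_append, List.filter_map]
  rw [List.map_map]
  rfl

theorem mem_bIndex (pats : List String) (q : List Char) (j : Int) :
    j ∈ (bIndex pats).getD q []
      ↔ ∃ m : Nat, m < pats.length ∧ j = (m : Int) ∧ (pats.getD m "").toList = q := by
  rw [bIndex_getD]
  simp only [List.mem_map, List.mem_filter]
  constructor
  · rintro ⟨e, ⟨he, hq⟩, rfl⟩
    rcases (PySem.List.mem_enumerate_iff _ _ _).mp he with ⟨m, hm, rfl⟩
    exact ⟨m, hm, by simp, by
      rw [List.getD_eq_getElem _ _ hm]; exact beq_iff_eq.mp hq⟩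
  · rintro ⟨m, hm, rfl, hq⟩
    refine ⟨((m : Int), pats[m]), ⟨(PySem.List.mem_enumerate_iff _ _ _).mpr ⟨m, hm, by simp⟩, ?_⟩, rfl⟩
    rw [List.getD_eq_getElem _ _ hm] at hq
    exact beq_iff_eq.mpr hq

theorem pairwise_bIndex (pats : List String) (q : List Char) :
    ((bIndex pats).getD q []).Pairwise (· < ·) := by
  rw [bIndex_getD]
  exact (((PySem.List.pairwise_lt_enumerate pats 0).filter _).map _) (by exact fun _ _ h => h)

-- the row as a flatMap
theorem bRow_eq (pats : List String) (idx : PySem.Dict (List Char) (List Int)) (i : Int)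
    (p : String) :
    bRow pats idx i p
      = (PySem.List.pyRange 0 (PySem.Str.len p)).flatMap (fun a =>
          if isBin (PySem.List.pyGetD p.toList a ' ') then
            (PySem.List.pyRange (a + 1) (PySem.Str.len p)).flatMap (fun b =>
              if isBin (PySem.List.pyGetD p.toList b ' ') then
                (PySem.Dict.getD idx (qKey p.toList a b) []).flatMap (fun j =>
                  if i < j then
                    [(j, (p, PySem.List.pyGetD pats j "", [a, b],
                      String.ofList [PySem.List.pyGetD p.toList a ' ',
                        PySem.List.pyGetD p.toList b ' ',
                        '-', flipC (PySem.List.pyGetD p.toList a ' '),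
                        flipC (PySem.List.pyGetD p.toList b ' ')]))]
                  else [])
              else [])
          else []) := by
  simp only [bRow]
  have hJ : ∀ (a b : Int) (acc : List (Int × (String × String × List Int × String))),
      (PySem.Dict.getD idx (qKey p.toList a b) []).foldl (fun row j =>
          if i < j then
            row ++ [(j, (p, PySem.List.pyGetD pats j "", [a, b],
                      String.ofList [PySem.List.pyGetD p.toList a ' ',
                        PySem.List.pyGetD p.toList b ' ',
                        '-', flipC (PySem.List.pyGetD p.toList a ' '),
                        flipC (PySem.List.pyGetD p.toList b ' ')]))]
          else row) acc
        = acc ++ (PySem.Dict.getD idx (qKey p.toList a b) []).flatMap (fun j =>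
            if i < j then
              [(j, (p, PySem.List.pyGetD pats j "", [a, b],
                      String.ofList [PySem.List.pyGetD p.toList a ' ',
                        PySem.List.pyGetD p.toList b ' ',
                        '-', flipC (PySem.List.pyGetD p.toList a ' '),
                        flipC (PySem.List.pyGetD p.toList b ' ')]))]
            else []) :=
    fun a b acc => foldl_if_flat _ _ _ acc
  have hB : ∀ (a : Int) (acc : List (Int × (String × String × List Int × String))),
      (PySem.List.pyRange (a + 1) (PySem.Str.len p)).foldl (fun row b =>
          if isBin (PySem.List.pyGetD p.toList b ' ') then
            (PySem.Dict.getD idx (qKey p.toList a b) []).foldl (fun row j =>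
              if i < j then
                row ++ [(j, (p, PySem.List.pyGetD pats j "", [a, b],
                      String.ofList [PySem.List.pyGetD p.toList a ' ',
                        PySem.List.pyGetD p.toList b ' ',
                        '-', flipC (PySem.List.pyGetD p.toList a ' '),
                        flipC (PySem.List.pyGetD p.toList b ' ')]))]
              else row) row
          else row) acc
        = acc ++ (PySem.List.pyRange (a + 1) (PySem.Str.len p)).flatMap (fun b =>
            if isBin (PySem.List.pyGetD p.toList b ' ') then
              (PySem.Dict.getD idx (qKey p.toList a b) []).flatMap (fun j =>
                if i < j then
                  [(j, (p, PySem.List.pyGetD pats j "", [a, b],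
                      String.ofList [PySem.List.pyGetD p.toList a ' ',
                        PySem.List.pyGetD p.toList b ' ',
                        '-', flipC (PySem.List.pyGetD p.toList a ' '),
                        flipC (PySem.List.pyGetD p.toList b ' ')]))]
                else [])
            else []) :=
    fun a acc => foldl_if_step _ _ _ (fun acc2 b => hJ a b acc2) _ acc
  exact (foldl_if_step _ _ _ (fun acc a => hB a acc) _ []).trans (List.nil_append _)

-- ---- the per-row equivalence ----

-- the target row: partners j of pattern k in ascending order, with the A-side value
def rowTgt (xs : List String) (k : Nat) : List (Int × (String × String × List Int × String)) :=
  ((List.range xs.length).filter (fun j => decide (k < j))).filterMap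
    (fun j => (innerA (xs.getD k "") (xs.getD j "")).map (fun v => ((j : Int), v)))

theorem rowTgt_pairwise (xs : List String) (k : Nat) :
    (rowTgt xs k).Pairwise (fun r s => r.1 < s.1) := by
  unfold rowTgt
  rw [List.pairwise_filterMap]
  refine ((List.pairwise_lt_range).filter _).imp ?_
  rintro a b hab x hx y hy
  cases hax : innerA (xs.getD k "") (xs.getD a "") <;> rw [hax] at hx <;>
    cases hby : innerA (xs.getD k "") (xs.getD b "") <;> rw [hby] at hy <;>
    simp only [Option.map_none, Option.map_some,
      Option.some.injEq, reduceCtorEq] at hx hy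
  subst hx
  subst hy
  dsimp only
  exact_mod_cast hab

theorem rowTgt_nodup (xs : List String) (k : Nat) : (rowTgt xs k).Nodup :=
  ((rowTgt_pairwise xs k).imp (fun h => by intro he; rw [he] at h; exact lt_irrefl _ h))

theorem bRow_nodup (xs : List String) (k : Nat) :
    (bRow xs (bIndex xs) (k : Int) (xs.getD k "")).Nodup := by
  rw [bRow_eq]
  refine nodup_flatMap_tag _ _ (fun x => x.2.2.2.1.getD 0 0) (PySem.List.nodup_pyRange_one _ _)
    (fun a _ => ?_) (fun a _ x hx => ?_)
  · -- each a-slot is Nodup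
    by_cases hca : isBin (PySem.List.pyGetD (xs.getD k "").toList a ' ') = true
    · rw [if_pos hca]
      refine nodup_flatMap_tag _ _ (fun x => x.2.2.2.1.getD 1 0) (PySem.List.nodup_pyRange_one _ _)
        (fun b _ => ?_) (fun b _ x hx => ?_)
      · by_cases hcb : isBin (PySem.List.pyGetD (xs.getD k "").toList b ' ') = true
        · rw [if_pos hcb]
          refine nodup_flatMap_tag _ _ (fun x => x.1)
            (((pairwise_bIndex xs _).imp (fun h => ne_of_lt h)))
            (fun j _ => ?_) (fun j _ x hx => ?_)
          · by_cases hkj : (k : Int) < j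
            · rw [if_pos hkj]; exact List.nodup_singleton _
            · rw [if_neg hkj]; exact List.nodup_nil
          · by_cases hkj : (k : Int) < j
            · rw [if_pos hkj] at hx
              rcases List.mem_singleton.mp hx with rfl
              rfl
            · rw [if_neg hkj] at hx; cases hx
        · rw [if_neg hcb]; exact List.nodup_nil
      · -- the b-tag
        by_cases hcb : isBin (PySem.List.pyGetD (xs.getD k "").toList b ' ') = true
        · rw [if_pos hcb] at hx
          rcases List.mem_flatMap.mp hx with ⟨j, _, hxj⟩
          by_cases hkj : (k : Int) < j
          · rw [if_pos hkj] at hxj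
            rcases List.mem_singleton.mp hxj with rfl
            rfl
          · rw [if_neg hkj] at hxj; cases hxj
        · rw [if_neg hcb] at hx; cases hx
    · rw [if_neg hca]; exact List.nodup_nil
  · -- the a-tag
    by_cases hca : isBin (PySem.List.pyGetD (xs.getD k "").toList a ' ') = true
    · rw [if_pos hca] at hx
      rcases List.mem_flatMap.mp hx with ⟨b, _, hxb⟩
      by_cases hcb : isBin (PySem.List.pyGetD (xs.getD k "").toList b ' ') = true
      · rw [if_pos hcb] at hxb
        rcases List.mem_flatMap.mp hxb with ⟨j, _, hxj⟩
        by_cases hkj : (k : Int) < j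
        · rw [if_pos hkj] at hxj
          rcases List.mem_singleton.mp hxj with rfl
          rfl
        · rw [if_neg hkj] at hxj; cases hxj
      · rw [if_neg hcb] at hxb; cases hxb
    · rw [if_neg hca] at hx; cases hx

theorem mem_bRow_iff (xs : List String) (k : Nat) (hk : k < xs.length)
    (hpre : Pre_find_xor_pairs xs) (x : Int × (String × String × List Int × String)) :
    x ∈ bRow xs (bIndex xs) (k : Int) (xs.getD k "") ↔ x ∈ rowTgt xs k := by
  have hpmem : xs.getD k "" ∈ xs := by
    rw [List.getD_eq_getElem _ _ hk]; exact List.getElem_mem hk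
  rw [bRow_eq]
  unfold rowTgt
  constructor
  · intro hx
    rcases List.mem_flatMap.mp hx with ⟨ai, hai, hx⟩
    by_cases hca : isBin (PySem.List.pyGetD (xs.getD k "").toList ai ' ') = true
    swap
    · rw [if_neg hca] at hx; cases hx
    rw [if_pos hca] at hx
    rcases List.mem_flatMap.mp hx with ⟨bi, hbi, hx⟩
    by_cases hcb : isBin (PySem.List.pyGetD (xs.getD k "").toList bi ' ') = true
    swap
    · rw [if_neg hcb] at hx; cases hx
    rw [if_pos hcb] at hx
    rcases List.mem_flatMap.mp hx with ⟨j, hj, hx⟩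
    by_cases hkj : (k : Int) < j
    swap
    · rw [if_neg hkj] at hx; cases hx
    rw [if_pos hkj] at hx
    rcases List.mem_singleton.mp hx with rfl
    -- convert the Int positions to Nat
    rw [PySem.Str.len_eq] at hai hbi
    have hai' := PySem.List.mem_pyRange_one.mp hai
    have hbi' := PySem.List.mem_pyRange_one.mp hbi
    obtain ⟨a, rfl⟩ : ∃ a : Nat, ai = (a : Int) := ⟨ai.toNat, by omega⟩
    obtain ⟨b, rfl⟩ : ∃ b : Nat, bi = (b : Int) := ⟨bi.toNat, by omega⟩
    have hab : a < b := by omega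
    have hbL : b < (xs.getD k "").toList.length := by omega
    rw [PySem.List.pyGetD_natCast] at hca hcb
    rw [qKey_eq _ a b hab hbL] at hj
    rcases (mem_bIndex xs _ j).mp hj with ⟨m, hm, rfl, hq⟩
    have hkm : k < m := by exact_mod_cast hkj
    have hlen : (xs.getD k "").toList.length = (xs.getD m "").toList.length :=
      hpre _ hpmem _ (by rw [List.getD_eq_getElem _ _ hm]; exact List.getElem_mem hm)
    have hinner : innerA (xs.getD k "") (xs.getD m "")
        = some ((xs.getD k ""), (xs.getD m ""), [(a : Int), (b : Int)],
            String.ofList [(xs.getD k "").toList.getD a ' ', (xs.getD k "").toList.getD b ' ',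
              '-', flipC ((xs.getD k "").toList.getD a ' '),
              flipC ((xs.getD k "").toList.getD b ' ')]) :=
      (innerA_iff _ _ hlen _).mpr ⟨a, b, hab, hbL, hca, hcb, hq, rfl⟩
    refine List.mem_filterMap.mpr ⟨m, List.mem_filter.mpr
      ⟨List.mem_range.mpr hm, by simpa using hkm⟩, ?_⟩
    rw [hinner]
    simp only [Option.map_some, Option.some.injEq]
    rw [PySem.List.pyGetD_natCast, PySem.List.pyGetD_natCast, PySem.List.pyGetD_natCast]
  · intro hx
    rcases List.mem_filterMap.mp hx with ⟨m, hmf, hmap⟩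
    have hm : m < xs.length := List.mem_range.mp (List.mem_of_mem_filter hmf)
    have hkm : k < m := by simpa using (List.mem_filter.mp hmf).2
    cases hv : innerA (xs.getD k "") (xs.getD m "") with
    | none => rw [hv] at hmap; cases hmap
    | some v =>
      rw [hv] at hmap
      simp only [Option.map_some, Option.some.injEq] at hmap
      subst hmap
      have hlen : (xs.getD k "").toList.length = (xs.getD m "").toList.length :=
        hpre _ hpmem _ (by rw [List.getD_eq_getElem _ _ hm]; exact List.getElem_mem hm)
      rcases (innerA_iff _ _ hlen _).mp hv with ⟨a, b, hab, hbL, hca, hcb, hq, rfl⟩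
      refine List.mem_flatMap.mpr ⟨(a : Int), ?_, ?_⟩
      · rw [PySem.Str.len_eq]
        exact PySem.List.mem_pyRange_one.mpr ⟨by omega, by exact_mod_cast by omega⟩
      rw [PySem.List.pyGetD_natCast, if_pos hca]
      refine List.mem_flatMap.mpr ⟨(b : Int), ?_, ?_⟩
      · rw [PySem.Str.len_eq]
        refine PySem.List.mem_pyRange_one.mpr ⟨by omega, by exact_mod_cast hbL⟩
      rw [PySem.List.pyGetD_natCast, if_pos hcb]
      refine List.mem_flatMap.mpr ⟨(m : Int), ?_, ?_⟩
      · rw [qKey_eq _ a b hab hbL]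
        exact (mem_bIndex xs _ _).mpr ⟨m, hm, rfl, hq⟩
      rw [if_pos (by exact_mod_cast hkm)]
      exact List.mem_singleton.mpr (by rw [PySem.List.pyGetD_natCast])

theorem sorted_bRow (xs : List String) (k : Nat) (hk : k < xs.length)
    (hpre : Pre_find_xor_pairs xs) :
    PySem.List.sorted (bRow xs (bIndex xs) (k : Int) (xs.getD k "")) (fun r => r.1)
      = rowTgt xs k := by
  refine PySem.List.sorted_eq_of_perm_of_pairwise_lt _ _ _ ?_ (rowTgt_pairwise xs k)
  exact ((List.perm_ext_iff_of_nodup (rowTgt_nodup xs k) (bRow_nodup xs k)).mpr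
    (fun a => (mem_bRow_iff xs k hk hpre a).symm))

theorem rowTgt_map_snd (xs : List String) (k : Nat) :
    (rowTgt xs k).map (fun r => r.2)
      = ((List.range xs.length).filter (fun j => decide (k < j))).filterMap
          (fun j => innerA (xs.getD k "") (xs.getD j "")) := by
  unfold rowTgt
  rw [List.map_filterMap]
  congr 1
  funext j
  cases innerA (xs.getD k "") (xs.getD j "") <;> rfl

-- the width check passes under Pre_
theorem width_check (xs : List String) (hpre : Pre_find_xor_pairs xs) :
    ¬ 1 < (PySem.Set.ofList (xs.map (fun p => PySem.Str.len p))).length := by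
  intro hgt
  have hnd := PySem.Set.nodup_ofList (xs.map (fun p => PySem.Str.len p))
  rcases hs : PySem.Set.ofList (xs.map (fun p => PySem.Str.len p)) with _ | ⟨x, _ | ⟨y, t⟩⟩
  · rw [hs] at hgt; simp at hgt
  · rw [hs] at hgt; simp at hgt
  · have hx : x ∈ PySem.Set.ofList (xs.map (fun p => PySem.Str.len p)) := by rw [hs]; simp
    have hy : y ∈ PySem.Set.ofList (xs.map (fun p => PySem.Str.len p)) := by rw [hs]; simp
    rw [PySem.Set.mem_ofList, List.mem_map] at hx hy
    rcases hx with ⟨px, hpx, rfl⟩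
    rcases hy with ⟨py, hpy, rfl⟩
    rw [hs] at hnd
    have hne := (List.nodup_cons.mp hnd).1
    apply hne
    rw [List.mem_cons]
    left
    rw [PySem.Str.len_eq, PySem.Str.len_eq, hpre px hpx py hpy]

-- B as a flatMap of sorted rows
theorem B_rows (xs : List String) (hpre : Pre_find_xor_pairs xs) :
    find_xor_pairs_alt xs = (List.range xs.length).flatMap (fun (k : Nat) =>
      (PySem.List.sorted (bRow xs (bIndex xs) (k : Int) (xs.getD k "")) (fun r => r.1)).map
        (fun r => r.2)) := by
  unfold find_xor_pairs_alt
  rw [if_neg (width_check xs hpre)]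
  rw [PySem.List.foldl_append_eq_flatMap, List.nil_append,
    PySem.List.enumerate_eq_map_pyRange xs "", PySem.List.len_eq,
    PySem.List.pyRange_zero_nat, List.flatMap_map, List.flatMap_map]
  refine flatMap_congr_mem _ _ _ (fun k hk => ?_)
  simp only [PySem.List.pyGetD_natCast]

-- ===== VERDICT (by name: the statement is the Claim_ definition above) =====
theorem find_xor_pairs_spec : Claim_equal_find_xor_pairs := by
  intro xs _ hpre
  unfold Spec_find_xor_pairs
  rw [A_rows, B_rows xs hpre]
  refine flatMap_congr_mem _ _ _ (fun k hk => ?_)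
  rw [sorted_bRow xs k (List.mem_range.mp hk) hpre, rowTgt_map_snd]
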